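-- pv_equiv track=rewrite | github.com/rheard/AOC | 2024/p02_2.py | evaluate_report
-- ===== SOURCE A (Python) =====
-- def evaluate_report(r):
--     if r[0] < r[1]:
--         increasing = True
--     elif r[0] > r[1]:
--         increasing = False
--     else:
--         # Not increasing or decreasing
--         return False
--
--     limit = r[0]
--     for level in r[1:]:
--         if increasing:
--             if level <= limit:
--                 return False
--             difference = level - limit
--         else:
--             if level >= limit:
--                 return False
--             difference = limit - level
--         if not (1 <= difference <= 3):
--             return False
--         limit = level
--
--     return True
-- ===== SOURCE B (Python) =====
-- def evaluate_report(r):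
--     s = sorted(r)
--     if r != s and r != list(reversed(s)):
--         return False
--     if len(set(r)) != len(r):
--         return False
--     return max(abs(b - a) for a, b in zip(r, r[1:])) <= 3
-- ===== Notes on version B (the rewrite author's own statement) =====
-- stated objective: alternative
-- what changed: Replaces A's fused directional scan (decide increasing/decreasing from the first pair, then one loop carrying a 'limit' accumulator with early returns) by a sort-based global characterisation: the report is valid iff the list equals its sorted or reverse-sorted order, has no duplicates (set size check), and its maximum absolute adjacent gap is at most 3.
import Mathlib
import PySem

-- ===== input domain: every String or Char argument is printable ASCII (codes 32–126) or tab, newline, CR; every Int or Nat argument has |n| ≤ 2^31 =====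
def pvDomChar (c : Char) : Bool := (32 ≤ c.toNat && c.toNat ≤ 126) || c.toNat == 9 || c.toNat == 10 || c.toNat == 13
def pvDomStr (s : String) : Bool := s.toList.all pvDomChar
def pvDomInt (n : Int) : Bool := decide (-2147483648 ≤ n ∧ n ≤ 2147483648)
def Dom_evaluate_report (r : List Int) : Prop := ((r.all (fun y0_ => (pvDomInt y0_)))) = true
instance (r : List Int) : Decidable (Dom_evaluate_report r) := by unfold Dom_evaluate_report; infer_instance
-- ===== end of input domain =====

-- B replaces A's fused directional scan (direction decided from the first pair, then a 'limit'
-- accumulator with early returns) by a global characterisation: r equals its sorted or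
-- reverse-sorted order, has no duplicates, and its maximum absolute adjacent gap is ≤ 3.

-- ===== PORT A =====
-- A's for-loop over r[1:] with accumulator 'limit' and early returns.
def evaluateLoopA (increasing : Bool) (limit : Int) : List Int → Bool
  | [] => true
  | level :: rest =>
    if increasing then
      if level ≤ limit then false
      else
        let difference := level - limit
        if 1 ≤ difference ∧ difference ≤ 3 then evaluateLoopA increasing level rest else false
    else
      if level ≥ limit then false
      else
        let difference := limit - level
        if 1 ≤ difference ∧ difference ≤ 3 then evaluateLoopA increasing level rest else false

def evaluate_report (r : List Int) : Bool :=
  -- r[0], r[1] raise IndexError when r has fewer than two elements: excluded by Pre_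
  match r with
  | r0 :: r1 :: rest =>
    if r0 < r1 then evaluateLoopA true r0 (r1 :: rest)
    else if r0 > r1 then evaluateLoopA false r0 (r1 :: rest)
    else false
  | _ => false

-- ===== PORT B =====
def evaluate_report_alt (r : List Int) : Bool :=
  let s := PySem.List.sorted r (fun x => x)
  if r ≠ s ∧ r ≠ s.reverse then false
  else if PySem.Set.len (PySem.Set.ofList r) ≠ (r.length : Int) then false
  else
    -- max() of an empty sequence raises ValueError in Python (only when r has < 2 elements): excluded by Pre_
    match PySem.List.max? ((r.zip (PySem.List.slice r (some 1))).map (fun p => |p.2 - p.1|)) (fun x => x) with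
    | some m => decide (m ≤ 3)
    | none => false

-- ===== PRECONDITION & SPEC =====
-- A raises IndexError on r[0]/r[1] (and B's max() raises ValueError) when r has fewer than two elements.
def Pre_evaluate_report (r : List Int) : Prop := 2 ≤ r.length
instance (r : List Int) : Decidable (Pre_evaluate_report r) := by unfold Pre_evaluate_report; infer_instance
def pvWitness_evaluate_report : List Int := [1, 2, 4]

def Spec_evaluate_report (r : List Int) (out : Bool) : Prop := out = evaluate_report_alt r
instance (r : List Int) (out : Bool) : Decidable (Spec_evaluate_report r out) := by unfold Spec_evaluate_report; infer_instance

-- ===== CLAIM (what is proved, stated in full; the proofs are below) =====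
def Claim_equal_evaluate_report : Prop := ∀ (r : List Int), Dom_evaluate_report r → Pre_evaluate_report r → Spec_evaluate_report r (evaluate_report r)

-- ===== LEMMAS AND PROOFS =====

-- The common yardstick: all adjacent pairs step up (resp. down) by 1..3.
def allUpB (r : List Int) : Bool := (r.zip r.tail).all (fun p => decide (1 ≤ p.2 - p.1 ∧ p.2 - p.1 ≤ 3))
def allDownB (r : List Int) : Bool := (r.zip r.tail).all (fun p => decide (1 ≤ p.1 - p.2 ∧ p.1 - p.2 ≤ 3))

-- A's increasing loop over l from 'limit' checks exactly the adjacent pairs of limit::l.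
theorem loopA_true (l : List Int) (limit : Int) :
    evaluateLoopA true limit l
      = ((limit :: l).zip l).all (fun p => decide (1 ≤ p.2 - p.1 ∧ p.2 - p.1 ≤ 3)) := by
  induction l generalizing limit with
  | nil => rfl
  | cons x xs ih =>
    simp only [evaluateLoopA, List.zip_cons_cons, List.all_cons]
    by_cases h2 : 1 ≤ x - limit ∧ x - limit ≤ 3
    · have h1 : ¬ x ≤ limit := by omega
      simp [h1, h2, ih]
    · have hd : decide (1 ≤ x - limit ∧ x - limit ≤ 3) = false := by
        simp only [decide_eq_false_iff_not]; exact h2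
      rw [hd, Bool.false_and]
      split_ifs <;> rfl

theorem loopA_false (l : List Int) (limit : Int) :
    evaluateLoopA false limit l
      = ((limit :: l).zip l).all (fun p => decide (1 ≤ p.1 - p.2 ∧ p.1 - p.2 ≤ 3)) := by
  induction l generalizing limit with
  | nil => rfl
  | cons x xs ih =>
    simp only [evaluateLoopA, List.zip_cons_cons, List.all_cons]
    by_cases h2 : 1 ≤ limit - x ∧ limit - x ≤ 3
    · have h1 : ¬ x ≥ limit := by omega
      simp [h1, h2, ih]
    · have hd : decide (1 ≤ limit - x ∧ limit - x ≤ 3) = false := by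
        simp only [decide_eq_false_iff_not]; exact h2
      rw [hd, Bool.false_and]
      split_ifs <;> first | rfl | exact (‹False›).elim

-- A equals the yardstick on lists of length ≥ 2.
theorem A_eq_E (r0 r1 : Int) (rest : List Int) :
    evaluate_report (r0 :: r1 :: rest) = (allUpB (r0 :: r1 :: rest) || allDownB (r0 :: r1 :: rest)) := by
  unfold allUpB allDownB
  simp only [List.tail_cons, List.zip_cons_cons, List.all_cons]
  by_cases h : r0 < r1
  · have hd : decide (1 ≤ r0 - r1 ∧ r0 - r1 ≤ 3) = false := by
      simp only [decide_eq_false_iff_not]; omega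
    simp only [evaluate_report, if_pos h, hd, Bool.false_and, Bool.or_false]
    rw [loopA_true]
    simp only [List.zip_cons_cons, List.all_cons]
  · by_cases h' : r0 > r1
    · have hu : decide (1 ≤ r1 - r0 ∧ r1 - r0 ≤ 3) = false := by
        simp only [decide_eq_false_iff_not]; omega
      simp only [evaluate_report, if_neg h, if_pos h', hu, Bool.false_and, Bool.false_or]
      rw [loopA_false]
      simp only [List.zip_cons_cons, List.all_cons]
    · have he : r0 = r1 := by omega
      subst he
      have h1 : decide (1 ≤ r0 - r0 ∧ r0 - r0 ≤ 3) = false := by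
        simp only [decide_eq_false_iff_not]; omega
      simp only [evaluate_report, if_neg h, h1, Bool.false_and, Bool.or_self]

-- Adjacent-pair check of a transitive relation is the pairwise check.
theorem zip_all_iff_pairwise (Q : Int → Int → Bool)
    (ht : ∀ a b c, Q a b = true → Q b c = true → Q a c = true) :
    ∀ r : List Int, ((r.zip r.tail).all (fun p => Q p.1 p.2) = true ↔ List.Pairwise (fun a b => Q a b = true) r)
  | [] => by simp
  | [x] => by simp
  | x :: y :: t => by
    have ih := zip_all_iff_pairwise Q ht (y :: t)
    simp only [List.tail_cons, List.zip_cons_cons, List.all_cons, Bool.and_eq_true] at *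
    constructor
    · rintro ⟨hxy, hrest⟩
      have hp := ih.mp hrest
      refine List.pairwise_cons.mpr ⟨?_, hp⟩
      intro b hb
      rcases List.mem_cons.mp hb with hb | hb
      · subst hb; exact hxy
      · exact ht _ _ _ hxy ((List.pairwise_cons.mp hp).1 b hb)
    · intro hp
      rcases List.pairwise_cons.mp hp with ⟨hx, hrest⟩
      exact ⟨hx y (List.mem_cons_self), ih.mpr hrest⟩

theorem zip_all_lt_iff (r : List Int) :
    ((r.zip r.tail).all (fun p => decide (p.1 < p.2)) = true ↔ List.Pairwise (· < ·) r) := by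
  have := zip_all_iff_pairwise (fun a b => decide (a < b)) (by intro a b c h1 h2; simp at *; omega) r
  simpa using this

theorem zip_all_gt_iff (r : List Int) :
    ((r.zip r.tail).all (fun p => decide (p.2 < p.1)) = true ↔ List.Pairwise (fun a b => b < a) r) := by
  have := zip_all_iff_pairwise (fun a b => decide (b < a)) (by intro a b c h1 h2; simp at *; omega) r
  simpa using this

-- set(r) is a sublist of r.
theorem foldl_add_sublist : ∀ (xs acc : List Int), (List.foldl PySem.Set.add acc xs).Sublist (acc ++ xs)
  | [], acc => by simp
  | x :: xs, acc => by
    simp only [List.foldl_cons]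
    by_cases h : PySem.Set.contains acc x = true
    · have : PySem.Set.add acc x = acc := by unfold PySem.Set.add; rw [if_pos h]
      rw [this]
      exact (foldl_add_sublist xs acc).trans (by
        refine List.Sublist.append_left ?_ acc
        exact List.sublist_cons_self x xs)
    · have : PySem.Set.add acc x = acc ++ [x] := by unfold PySem.Set.add; rw [if_neg h]
      rw [this]
      have := foldl_add_sublist xs (acc ++ [x])
      simpa using this

theorem ofList_length_eq_iff (r : List Int) :
    ((PySem.Set.ofList r).length = r.length ↔ r.Nodup) := by
  have hsub : (PySem.Set.ofList r).Sublist r := by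
    have := foldl_add_sublist r []
    simpa [PySem.Set.ofList_eq_foldl] using this
  constructor
  · intro h
    have : PySem.Set.ofList r = r := hsub.eq_of_length h
    rw [← this]
    exact PySem.Set.nodup_ofList r
  · intro hn
    refine le_antisymm (hsub.length_le) ?_
    calc r.length = r.toFinset.card := (List.toFinset_card_of_nodup hn).symm
      _ ≤ (PySem.Set.ofList r).toFinset.card := Finset.card_le_card (by
          intro x hx
          simp only [List.mem_toFinset] at *
          exact (PySem.Set.mem_ofList r x).mpr hx)
      _ ≤ (PySem.Set.ofList r).length := (PySem.Set.ofList r).toFinset_card_le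

-- The up (resp. down) yardstick forces r to be strictly increasing (resp. decreasing).
theorem pairwise_lt_of_allUp {r : List Int} (h : allUpB r = true) : List.Pairwise (· < ·) r := by
  refine (zip_all_lt_iff r).mp ?_
  unfold allUpB at h
  rw [List.all_eq_true] at h ⊢
  intro p hp
  have := h p hp
  simp only [decide_eq_true_eq] at *
  omega

theorem pairwise_gt_of_allDown {r : List Int} (h : allDownB r = true) : List.Pairwise (fun a b => b < a) r := by
  refine (zip_all_gt_iff r).mp ?_
  unfold allDownB at h
  rw [List.all_eq_true] at h ⊢
  intro p hp
  have := h p hp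
  simp only [decide_eq_true_eq] at *
  omega

-- If the yardstick holds, B returns true.
theorem B_of_E (r0 r1 : Int) (rest : List Int)
    (h : allUpB (r0 :: r1 :: rest) = true ∨ allDownB (r0 :: r1 :: rest) = true) :
    evaluate_report_alt (r0 :: r1 :: rest) = true := by
  set r : List Int := r0 :: r1 :: rest with hr
  -- the sorted-order condition
  have hsorted : r = PySem.List.sorted r (fun x => x) ∨ r = (PySem.List.sorted r (fun x => x)).reverse := by
    rcases h with h | h
    · left
      exact (PySem.List.sorted_eq_of_perm_of_pairwise_lt r r (fun x => x) (List.Perm.refl r)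
        (pairwise_lt_of_allUp h)).symm
    · right
      have : PySem.List.sorted r (fun x => x) = r.reverse :=
        PySem.List.sorted_eq_of_perm_of_pairwise_lt r r.reverse (fun x => x) (r.reverse_perm)
          (List.pairwise_reverse.mpr (pairwise_gt_of_allDown h))
      rw [this, List.reverse_reverse]
  -- no duplicates
  have hnodup : r.Nodup := by
    rcases h with h | h
    · exact (pairwise_lt_of_allUp h).imp ne_of_lt
    · exact (pairwise_gt_of_allDown h).imp (fun hba => (ne_of_lt hba).symm)
  have hlen : PySem.Set.len (PySem.Set.ofList r) = (r.length : Int) := by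
    show ((PySem.Set.ofList r).length : Int) = (r.length : Int)
    exact_mod_cast (ofList_length_eq_iff r).mpr hnodup
  -- every absolute adjacent gap is ≤ 3
  have hgap : ∀ p ∈ r.zip r.tail, |p.2 - p.1| ≤ 3 := by
    intro p hp
    unfold allUpB allDownB at h
    rcases h with h | h
    · have := (List.all_eq_true.mp h) p hp
      simp only [decide_eq_true_eq] at this
      rw [abs_of_pos (by omega)]; omega
    · have := (List.all_eq_true.mp h) p hp
      simp only [decide_eq_true_eq] at this
      rw [abs_of_neg (by omega)]; omega
  -- assemble B
  simp only [evaluate_report_alt, PySem.List.slice_from_one]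
  have hc1 : ¬ (r ≠ PySem.List.sorted r (fun x => x) ∧ r ≠ (PySem.List.sorted r (fun x => x)).reverse) := by
    rintro ⟨h1, h2⟩
    rcases hsorted with hs | hs
    · exact h1 hs
    · exact h2 hs
  rw [if_neg hc1, if_neg (not_ne_iff.mpr hlen)]
  have hne : (r.zip r.tail).map (fun p => |p.2 - p.1|) ≠ [] := by
    rw [hr]
    simp only [List.tail_cons, List.zip_cons_cons, List.map_cons]
    exact List.cons_ne_nil _ _
  rcases hm : PySem.List.max? ((r.zip r.tail).map (fun p => |p.2 - p.1|)) (fun x => x) with _ | m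
  · exact absurd ((PySem.List.max?_eq_none_iff _ _).mp hm) hne
  · have hmem := PySem.List.max?_mem hm
    rcases List.mem_map.mp hmem with ⟨p, hp, hpm⟩
    have := hgap p hp
    rw [hm]
    simp only [decide_eq_true_eq]
    omega

-- If B returns true, the yardstick holds.
theorem E_of_B (r0 r1 : Int) (rest : List Int)
    (hB : evaluate_report_alt (r0 :: r1 :: rest) = true) :
    allUpB (r0 :: r1 :: rest) = true ∨ allDownB (r0 :: r1 :: rest) = true := by
  set r : List Int := r0 :: r1 :: rest with hr
  simp only [evaluate_report_alt, PySem.List.slice_from_one] at hB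
  by_cases hc1 : (r ≠ PySem.List.sorted r (fun x => x) ∧ r ≠ (PySem.List.sorted r (fun x => x)).reverse)
  · rw [if_pos hc1] at hB; exact absurd hB (by simp)
  · rw [if_neg hc1] at hB
    by_cases hc2 : PySem.Set.len (PySem.Set.ofList r) ≠ (r.length : Int)
    · rw [if_pos hc2] at hB; exact absurd hB (by simp)
    · rw [if_neg hc2] at hB
      -- no duplicates
      have hnodup : r.Nodup := by
        refine (ofList_length_eq_iff r).mp ?_
        have h := not_not.mp hc2
        have h' : ((PySem.Set.ofList r).length : Int) = (r.length : Int) := h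
        exact_mod_cast h'
      -- all absolute gaps ≤ 3
      have hgap : ∀ p ∈ r.zip r.tail, |p.2 - p.1| ≤ 3 := by
        rcases hm : PySem.List.max? ((r.zip r.tail).map (fun p => |p.2 - p.1|)) (fun x => x) with _ | m
        · rw [hm] at hB; exact absurd hB (by simp)
        · rw [hm] at hB
          simp only [decide_eq_true_eq] at hB
          intro p hp
          have := PySem.List.max?_isMax hm _ (List.mem_map.mpr ⟨p, hp, rfl⟩)
          omega
      -- direction
      rw [not_and_or, not_not, not_not] at hc1
      rcases em (r = PySem.List.sorted r (fun x => x)) with hs | hs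
      · left
        have hle : List.Pairwise (fun a b : Int => a ≤ b) r := by
          have := PySem.List.sorted_pairwise r (fun x => x)
          rw [← hs] at this
          exact this
        have hlt : List.Pairwise (· < ·) r :=
          (hle.and hnodup).imp (fun ⟨h1, h2⟩ => lt_of_le_of_ne h1 h2)
        have := (zip_all_lt_iff r).mpr hlt
        unfold allUpB
        rw [List.all_eq_true] at this ⊢
        intro p hp
        have h1 := this p hp
        have h2 := hgap p hp
        simp only [decide_eq_true_eq] at *
        rw [abs_of_pos (by omega)] at h2
        omega
      · right
        have hs' : r = (PySem.List.sorted r (fun x => x)).reverse := hc1.resolve_left hs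
        have hge : List.Pairwise (fun a b : Int => b ≤ a) r := by
          have hp := PySem.List.sorted_pairwise r (fun x => x)
          have hrev : PySem.List.sorted r (fun x => x) = r.reverse := by
            conv_rhs => rw [hs']
            rw [List.reverse_reverse]
          rw [hrev] at hp
          exact List.pairwise_reverse.mp hp
        have hgt : List.Pairwise (fun a b : Int => b < a) r :=
          (hge.and hnodup).imp (fun ⟨h1, h2⟩ => lt_of_le_of_ne h1 (Ne.symm h2))
        have := (zip_all_gt_iff r).mpr hgt
        unfold allDownB
        rw [List.all_eq_true] at this ⊢
        intro p hp
        have h1 := this p hp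
        have h2 := hgap p hp
        simp only [decide_eq_true_eq] at *
        rw [abs_of_neg (by omega)] at h2
        omega

-- B equals the yardstick on lists of length ≥ 2.
theorem B_eq_E (r0 r1 : Int) (rest : List Int) :
    evaluate_report_alt (r0 :: r1 :: rest) = (allUpB (r0 :: r1 :: rest) || allDownB (r0 :: r1 :: rest)) := by
  rw [Bool.eq_iff_iff]
  constructor
  · intro hB
    rcases E_of_B r0 r1 rest hB with h | h <;> simp [h]
  · intro hE
    rcases Bool.or_eq_true_iff.mp hE with h | h <;> exact B_of_E r0 r1 rest (by tauto)

-- ===== VERDICT (by name: the statement is the Claim_ definition above) =====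
theorem evaluate_report_spec : Claim_equal_evaluate_report := by
  intro r _ hpre
  match r with
  | [] => simp [Pre_evaluate_report] at hpre
  | [_] => simp [Pre_evaluate_report] at hpre
  | r0 :: r1 :: rest =>
    show evaluate_report _ = evaluate_report_alt _
    rw [A_eq_E, B_eq_E]
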